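-- pv_equiv track=rewrite | github.com/ryohei-kamiya/2D-GRD | src/gesture_recognizer.py | _undiff_points
-- ===== SOURCE A (Python) =====
-- def _undiff_points(diff_points, start_point=[0, 0]):
--     result = []
--     if len(diff_points) > 0:
--         p0 = start_point
--         for dp in diff_points:
--             p1 = [p0[0]+dp[0], p0[1]+dp[1]]
--             result.append(p1)
--             p0 = p1
--     return result
-- ===== SOURCE B (Python) =====
-- def _undiff_points(diff_points, start_point=[0, 0]):
--     if not diff_points:
--         return []
--     xs = []
--     x = start_point[0]
--     for dp in diff_points:
--         x += dp[0]
--         xs.append(x)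
--     ys = []
--     y = start_point[1]
--     for dp in diff_points:
--         y += dp[1]
--         ys.append(y)
--     return [[a, b] for a, b in zip(xs, ys)]
-- ===== Notes on version B (the rewrite author's own statement) =====
-- stated objective: alternative
-- what changed: B computes the x- and y-coordinates as two independent scalar prefix-sum passes and zips them into pairs, instead of threading one point list through a single interleaved pass.
import Mathlib
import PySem

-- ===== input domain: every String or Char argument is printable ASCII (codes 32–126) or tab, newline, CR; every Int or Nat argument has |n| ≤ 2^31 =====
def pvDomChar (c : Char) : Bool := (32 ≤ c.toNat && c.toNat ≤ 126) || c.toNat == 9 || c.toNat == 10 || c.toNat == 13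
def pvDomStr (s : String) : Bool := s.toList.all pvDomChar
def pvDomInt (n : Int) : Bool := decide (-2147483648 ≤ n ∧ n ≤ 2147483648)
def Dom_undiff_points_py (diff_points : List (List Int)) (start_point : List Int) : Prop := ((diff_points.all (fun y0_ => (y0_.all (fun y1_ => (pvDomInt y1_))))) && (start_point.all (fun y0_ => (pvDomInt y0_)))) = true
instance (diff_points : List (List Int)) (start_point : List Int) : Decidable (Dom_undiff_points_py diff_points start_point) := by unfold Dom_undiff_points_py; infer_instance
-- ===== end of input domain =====

-- B replaces A's single pass threading a point through the loop by two independent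
-- scalar prefix-sum passes (x then y) zipped into pairs; objective: alternative decomposition.

-- ===== PORT A =====
-- literal transliteration of A: one fold threading (result, p0)
def undiff_points_py (diff_points : List (List Int)) (start_point : List Int) : List (List Int) :=
  if diff_points.length > 0 then
    (diff_points.foldl (fun (st : List (List Int) × List Int) dp =>
      let p1 : List Int := [(PySem.List.pyGet? st.2 0).getD 0 + (PySem.List.pyGet? dp 0).getD 0,
                           (PySem.List.pyGet? st.2 1).getD 0 + (PySem.List.pyGet? dp 1).getD 0]
      (st.1 ++ [p1], p1)) ([], start_point)).1
  else []

-- ===== PORT B =====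
-- literal transliteration of B: two scalar prefix-sum folds, then zip
def undiff_points_py_alt (diff_points : List (List Int)) (start_point : List Int) : List (List Int) :=
  if diff_points = [] then []
  else
    let xs := (diff_points.foldl (fun (st : List Int × Int) dp =>
        let x := st.2 + (PySem.List.pyGet? dp 0).getD 0
        (st.1 ++ [x], x)) ([], (PySem.List.pyGet? start_point 0).getD 0)).1
    let ys := (diff_points.foldl (fun (st : List Int × Int) dp =>
        let y := st.2 + (PySem.List.pyGet? dp 1).getD 0
        (st.1 ++ [y], y)) ([], (PySem.List.pyGet? start_point 1).getD 0)).1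
    (xs.zip ys).map (fun p => [p.1, p.2])

-- ===== PRECONDITION & SPEC =====
-- Pre_ excludes exactly the inputs where Python A raises IndexError: a nonempty
-- diff_points with some dp (or start_point) having fewer than 2 elements.
def Pre_undiff_points_py (diff_points : List (List Int)) (start_point : List Int) : Prop :=
  diff_points ≠ [] → (2 ≤ start_point.length ∧ diff_points.all (fun dp => 2 ≤ dp.length) = true)
instance (diff_points : List (List Int)) (start_point : List Int) : Decidable (Pre_undiff_points_py diff_points start_point) := by unfold Pre_undiff_points_py; infer_instance

def pvWitness_undiff_points_py : List (List Int) × List Int := ([[1, 2], [-3, 4]], [10, 20])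

def Spec_undiff_points_py (diff_points : List (List Int)) (start_point : List Int) (out : List (List Int)) : Prop := out = undiff_points_py_alt diff_points start_point
instance (diff_points : List (List Int)) (start_point : List Int) (out : List (List Int)) : Decidable (Spec_undiff_points_py diff_points start_point out) := by unfold Spec_undiff_points_py; infer_instance

-- ===== CLAIM (what is proved, stated in full; the proofs are below) =====
def Claim_equal_undiff_points_py : Prop := ∀ (diff_points : List (List Int)) (start_point : List Int), Dom_undiff_points_py diff_points start_point → Pre_undiff_points_py diff_points start_point → Spec_undiff_points_py diff_points start_point (undiff_points_py diff_points start_point)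

-- ===== LEMMAS AND PROOFS =====

-- reference sequences
def gx : List (List Int) → Int → List Int
  | [], _ => []
  | dp :: t, x => (x + (PySem.List.pyGet? dp 0).getD 0) :: gx t (x + (PySem.List.pyGet? dp 0).getD 0)

def gy : List (List Int) → Int → List Int
  | [], _ => []
  | dp :: t, y => (y + (PySem.List.pyGet? dp 1).getD 0) :: gy t (y + (PySem.List.pyGet? dp 1).getD 0)

def go : List (List Int) → Int → Int → List (List Int)
  | [], _, _ => []
  | dp :: t, x, y =>
      [x + (PySem.List.pyGet? dp 0).getD 0, y + (PySem.List.pyGet? dp 1).getD 0] ::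
        go t (x + (PySem.List.pyGet? dp 0).getD 0) (y + (PySem.List.pyGet? dp 1).getD 0)

lemma foldA_eq (dps : List (List Int)) : ∀ (acc : List (List Int)) (p0 : List Int),
    (dps.foldl (fun (st : List (List Int) × List Int) dp =>
      let p1 : List Int := [(PySem.List.pyGet? st.2 0).getD 0 + (PySem.List.pyGet? dp 0).getD 0,
                           (PySem.List.pyGet? st.2 1).getD 0 + (PySem.List.pyGet? dp 1).getD 0]
      (st.1 ++ [p1], p1)) (acc, p0)).1
    = acc ++ go dps ((PySem.List.pyGet? p0 0).getD 0) ((PySem.List.pyGet? p0 1).getD 0) := by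
  induction dps with
  | nil => intro acc p0; simp [go]
  | cons dp t ih =>
    intro acc p0
    simp only [List.foldl, go]
    rw [ih]
    simp [PySem.List.pyGet?, PySem.List.pyIdx?]

lemma foldBx_eq (dps : List (List Int)) : ∀ (acc : List Int) (x0 : Int),
    (dps.foldl (fun (st : List Int × Int) dp =>
        let x := st.2 + (PySem.List.pyGet? dp 0).getD 0
        (st.1 ++ [x], x)) (acc, x0)).1 = acc ++ gx dps x0 := by
  induction dps with
  | nil => intro acc x0; simp [gx]
  | cons dp t ih => intro acc x0; simp only [List.foldl, gx]; rw [ih]; simp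

lemma foldBy_eq (dps : List (List Int)) : ∀ (acc : List Int) (y0 : Int),
    (dps.foldl (fun (st : List Int × Int) dp =>
        let y := st.2 + (PySem.List.pyGet? dp 1).getD 0
        (st.1 ++ [y], y)) (acc, y0)).1 = acc ++ gy dps y0 := by
  induction dps with
  | nil => intro acc y0; simp [gy]
  | cons dp t ih => intro acc y0; simp only [List.foldl, gy]; rw [ih]; simp

lemma zip_gx_gy (dps : List (List Int)) : ∀ (x y : Int),
    ((gx dps x).zip (gy dps y)).map (fun p => [p.1, p.2]) = go dps x y := by
  induction dps with
  | nil => intro x y; simp [gx, gy, go]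
  | cons dp t ih => intro x y; simp only [gx, gy, go, List.zip_cons_cons, List.map_cons, ih]

-- ===== VERDICT (by name: the statement is the Claim_ definition above) =====
theorem undiff_points_py_spec : Claim_equal_undiff_points_py := by
  intro dps sp _ _
  unfold Spec_undiff_points_py undiff_points_py undiff_points_py_alt
  cases dps with
  | nil => simp
  | cons dp t =>
    rw [if_pos (by simp : (dp :: t).length > 0), if_neg (by simp : ¬(dp :: t = []))]
    simp only [foldA_eq, foldBx_eq, foldBy_eq, List.nil_append]
    exact (zip_gx_gy _ _ _).symm
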